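-- pv_equiv track=rewrite | github.com/IamiL/word-converter | app/models/style_mapper.py | analyze_style_warnings
-- ===== SOURCE A (Python) =====
-- from typing import Dict, List, Pattern
--
-- def analyze_style_warnings(warnings: List[str]) -> Dict[str, List[str]]:
--     """
--     Анализирует предупреждения о стилях и категоризирует их
--
--     Args:
--         warnings: Список предупреждений от Mammoth
--
--     Returns:
--         Словарь с категоризированными предупреждениями
--     """
--     categorized = {
--         'undefined_styles': [],
--         'unrecognized_styles': [],
--         'missing_elements': [],
--         'table_formatting_ignored': [],
--         'other_warnings': []
--     }
--
--     for warning in warnings: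
--         if 'was referenced but not defined' in warning:
--             categorized['undefined_styles'].append(warning)
--         elif 'Unrecognised paragraph style' in warning:
--             categorized['unrecognized_styles'].append(warning)
--         elif 'unrecognised element was ignored' in warning:
--             if 'w:tblPrEx' in warning:
--                 categorized['table_formatting_ignored'].append(warning)
--             else:
--                 categorized['missing_elements'].append(warning)
--         else:
--             categorized['other_warnings'].append(warning)
--
--     return categorized
-- ===== SOURCE B (Python) =====
-- from typing import Dict, List
--
-- _CATEGORIES = [
--     'undefined_styles',
--     'unrecognized_styles',
--     'missing_elements',
--     'table_formatting_ignored',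
--     'other_warnings',
-- ]
--
-- def _classify(warning: str) -> str:
--     if 'was referenced but not defined' in warning:
--         return 'undefined_styles'
--     if 'Unrecognised paragraph style' in warning:
--         return 'unrecognized_styles'
--     if 'unrecognised element was ignored' in warning:
--         return 'table_formatting_ignored' if 'w:tblPrEx' in warning else 'missing_elements'
--     return 'other_warnings'
--
-- def analyze_style_warnings(warnings: List[str]) -> Dict[str, List[str]]:
--     return {cat: [w for w in warnings if _classify(w) == cat] for cat in _CATEGORIES}
-- ===== Notes on version B (the rewrite author's own statement) =====
-- stated objective: idiomatic
-- what changed: B replaces A's imperative route-each-warning-into-a-mutable-dict loop by a pure classifier function plus a dict comprehension that builds each category as one filter pass over the input.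
import Mathlib
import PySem

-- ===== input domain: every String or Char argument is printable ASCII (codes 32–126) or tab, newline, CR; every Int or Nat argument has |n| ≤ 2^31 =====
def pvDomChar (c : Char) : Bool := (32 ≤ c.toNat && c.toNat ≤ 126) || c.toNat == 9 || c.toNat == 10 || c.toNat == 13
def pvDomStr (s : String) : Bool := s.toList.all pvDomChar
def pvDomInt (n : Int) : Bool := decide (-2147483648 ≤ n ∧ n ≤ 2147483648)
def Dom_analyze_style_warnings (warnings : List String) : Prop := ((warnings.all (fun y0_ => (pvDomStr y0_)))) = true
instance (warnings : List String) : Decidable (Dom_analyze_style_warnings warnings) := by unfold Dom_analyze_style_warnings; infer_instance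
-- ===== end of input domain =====

-- B builds each category by one filter pass with a pure classifier instead of A's route-into-a-mutable-dict loop (objective: idiomatic).

-- ===== PORT A =====
-- one loop iteration of A: route the warning into the matching list of the dict
def pvStepA (d : PySem.Dict String (List String)) (warning : String) : PySem.Dict String (List String) :=
  if PySem.Str.isIn "was referenced but not defined" warning then
    d.modify "undefined_styles" [] (· ++ [warning])
  else if PySem.Str.isIn "Unrecognised paragraph style" warning then
    d.modify "unrecognized_styles" [] (· ++ [warning])
  else if PySem.Str.isIn "unrecognised element was ignored" warning then
    if PySem.Str.isIn "w:tblPrEx" warning then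
      d.modify "table_formatting_ignored" [] (· ++ [warning])
    else
      d.modify "missing_elements" [] (· ++ [warning])
  else
    d.modify "other_warnings" [] (· ++ [warning])

def analyze_style_warnings (warnings : List String) : List (String × List String) :=
  let categorized : PySem.Dict String (List String) :=
    PySem.Dict.mk [("undefined_styles", []), ("unrecognized_styles", []),
                   ("missing_elements", []), ("table_formatting_ignored", []),
                   ("other_warnings", [])]
  (warnings.foldl pvStepA categorized).items

-- ===== PORT B =====
def pvClassify (warning : String) : String :=
  if PySem.Str.isIn "was referenced but not defined" warning then "undefined_styles"
  else if PySem.Str.isIn "Unrecognised paragraph style" warning then "unrecognized_styles"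
  else if PySem.Str.isIn "unrecognised element was ignored" warning then
    (if PySem.Str.isIn "w:tblPrEx" warning then "table_formatting_ignored" else "missing_elements")
  else "other_warnings"

def pvCategories : List String :=
  ["undefined_styles", "unrecognized_styles", "missing_elements",
   "table_formatting_ignored", "other_warnings"]

def analyze_style_warnings_alt (warnings : List String) : List (String × List String) :=
  pvCategories.map (fun cat => (cat, warnings.filter (fun w => pvClassify w == cat)))

-- ===== PRECONDITION & SPEC =====
def Spec_analyze_style_warnings (warnings : List String) (out : List (String × List String)) : Prop := out = analyze_style_warnings_alt warnings
instance (warnings : List String) (out : List (String × List String)) : Decidable (Spec_analyze_style_warnings warnings out) := by unfold Spec_analyze_style_warnings; infer_instance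

-- ===== CLAIM (what is proved, stated in full; the proofs are below) =====
def Claim_equal_analyze_style_warnings : Prop := ∀ (warnings : List String), Dom_analyze_style_warnings warnings → Spec_analyze_style_warnings warnings (analyze_style_warnings warnings)

-- ===== LEMMAS AND PROOFS =====

-- A's loop body routes the warning under exactly the key B's classifier computes
lemma pvStepA_eq (d : PySem.Dict String (List String)) (w : String) :
    pvStepA d w = d.modify (pvClassify w) [] (· ++ [w]) := by
  unfold pvStepA pvClassify; split_ifs <;> rfl

lemma pvClassify_mem (w : String) : pvClassify w ∈ pvCategories := by
  unfold pvClassify pvCategories; split_ifs <;> simp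

-- loop invariant: A's fold over any tail, started from the five lists accumulated so far
lemma pvLoop (ws : List String) (u x m t o : List String) :
    (ws.foldl pvStepA (PySem.Dict.mk [("undefined_styles", u), ("unrecognized_styles", x), ("missing_elements", m), ("table_formatting_ignored", t), ("other_warnings", o)])).items
    = [("undefined_styles", u ++ ws.filter (fun w => pvClassify w == "undefined_styles")),
       ("unrecognized_styles", x ++ ws.filter (fun w => pvClassify w == "unrecognized_styles")),
       ("missing_elements", m ++ ws.filter (fun w => pvClassify w == "missing_elements")),
       ("table_formatting_ignored", t ++ ws.filter (fun w => pvClassify w == "table_formatting_ignored")),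
       ("other_warnings", o ++ ws.filter (fun w => pvClassify w == "other_warnings"))] := by
  induction ws generalizing u x m t o with
  | nil => simp
  | cons w ws ih =>
    rw [List.foldl_cons, pvStepA_eq]
    have hmem := pvClassify_mem w
    simp only [pvCategories, List.mem_cons, List.not_mem_nil, or_false] at hmem
    rcases hmem with h | h | h | h | h
    · have hd : (PySem.Dict.mk [("undefined_styles", u), ("unrecognized_styles", x), ("missing_elements", m), ("table_formatting_ignored", t), ("other_warnings", o)]).modify "undefined_styles" [] (· ++ [w])
          = PySem.Dict.mk [("undefined_styles", u ++ [w]), ("unrecognized_styles", x), ("missing_elements", m), ("table_formatting_ignored", t), ("other_warnings", o)] := by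
        simp [PySem.Dict.modify, PySem.Dict.getD, PySem.Dict.get?, PySem.Dict.insert]
      rw [h, hd, ih]
      simp [h]
    · have hd : (PySem.Dict.mk [("undefined_styles", u), ("unrecognized_styles", x), ("missing_elements", m), ("table_formatting_ignored", t), ("other_warnings", o)]).modify "unrecognized_styles" [] (· ++ [w])
          = PySem.Dict.mk [("undefined_styles", u), ("unrecognized_styles", x ++ [w]), ("missing_elements", m), ("table_formatting_ignored", t), ("other_warnings", o)] := by
        simp [PySem.Dict.modify, PySem.Dict.getD, PySem.Dict.get?, PySem.Dict.insert]
      rw [h, hd, ih]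
      simp [h]
    · have hd : (PySem.Dict.mk [("undefined_styles", u), ("unrecognized_styles", x), ("missing_elements", m), ("table_formatting_ignored", t), ("other_warnings", o)]).modify "missing_elements" [] (· ++ [w])
          = PySem.Dict.mk [("undefined_styles", u), ("unrecognized_styles", x), ("missing_elements", m ++ [w]), ("table_formatting_ignored", t), ("other_warnings", o)] := by
        simp [PySem.Dict.modify, PySem.Dict.getD, PySem.Dict.get?, PySem.Dict.insert]
      rw [h, hd, ih]
      simp [h]
    · have hd : (PySem.Dict.mk [("undefined_styles", u), ("unrecognized_styles", x), ("missing_elements", m), ("table_formatting_ignored", t), ("other_warnings", o)]).modify "table_formatting_ignored" [] (· ++ [w])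
          = PySem.Dict.mk [("undefined_styles", u), ("unrecognized_styles", x), ("missing_elements", m), ("table_formatting_ignored", t ++ [w]), ("other_warnings", o)] := by
        simp [PySem.Dict.modify, PySem.Dict.getD, PySem.Dict.get?, PySem.Dict.insert]
      rw [h, hd, ih]
      simp [h]
    · have hd : (PySem.Dict.mk [("undefined_styles", u), ("unrecognized_styles", x), ("missing_elements", m), ("table_formatting_ignored", t), ("other_warnings", o)]).modify "other_warnings" [] (· ++ [w])
          = PySem.Dict.mk [("undefined_styles", u), ("unrecognized_styles", x), ("missing_elements", m), ("table_formatting_ignored", t), ("other_warnings", o ++ [w])] := by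
        simp [PySem.Dict.modify, PySem.Dict.getD, PySem.Dict.get?, PySem.Dict.insert]
      rw [h, hd, ih]
      simp [h]

-- ===== VERDICT (by name: the statement is the Claim_ definition above) =====
theorem analyze_style_warnings_spec : Claim_equal_analyze_style_warnings := by
  intro warnings _
  show _ = _
  unfold analyze_style_warnings analyze_style_warnings_alt pvCategories
  rw [pvLoop]
  simp
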